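-- pv_equiv track=rewrite | github.com/pratham1singh/GFG-geeks-for-geeks-solutions | Wifi Range - GFG/wifi-range.py | wifiRange
-- ===== SOURCE A (Python) =====
-- def wifiRange(n, s, x):
--     c=0
--     for i in s:
--         if i=="0":
--             c+=1
--         else:
--             if c>x:
--                 return False
--             break
--     c=0
--     for i in s[::-1]:
--         if i=="0":
--             c+=1
--         else:
--             if c>x:
--                 return False
--             break
--     c=0
--     for i in s:
--         if i=="0":
--             c+=1
--         else:
--             if c>2*x:
--                 return False
--             c=0
--     return True
-- ===== SOURCE B (Python) =====
-- def wifiRange(n, s, x):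
--     idx = [i for i, ch in enumerate(s) if ch != '0']
--     if not idx:
--         return True
--     if idx[0] > x:
--         return False
--     if len(s) - 1 - idx[-1] > x:
--         return False
--     for a, b in zip(idx, idx[1:]):
--         if b - a - 1 > 2 * x:
--             return False
--     return True
-- ===== Notes on version B (the rewrite author's own statement) =====
-- stated objective: simpler
-- what changed: Replaces A's three counter-driven scans (leading zeros, trailing zeros over the reversed string, zero-run reset loop) with one index table of router positions plus arithmetic gap checks on its first/last element and adjacent pairs.
import Mathlib
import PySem

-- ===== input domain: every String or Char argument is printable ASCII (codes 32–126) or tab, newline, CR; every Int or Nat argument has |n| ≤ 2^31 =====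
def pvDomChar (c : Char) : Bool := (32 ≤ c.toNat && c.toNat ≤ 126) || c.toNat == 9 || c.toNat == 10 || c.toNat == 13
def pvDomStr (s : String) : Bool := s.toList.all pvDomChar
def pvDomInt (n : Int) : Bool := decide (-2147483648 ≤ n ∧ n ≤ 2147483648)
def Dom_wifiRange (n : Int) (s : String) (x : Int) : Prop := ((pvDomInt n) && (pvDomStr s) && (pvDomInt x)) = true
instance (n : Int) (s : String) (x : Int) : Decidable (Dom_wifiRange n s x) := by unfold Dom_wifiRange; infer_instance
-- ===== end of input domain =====

-- B replaces A's three counter scans by a router-position index table with arithmetic gap checks (simpler decomposition, same O(n) cost).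

-- ===== PORT A =====
-- A's first two 'for' loops are textually identical; this helper is that shared loop body
-- (count zeros in c, on the first non-'0' return False if c > x else break; end of string = no return).
def wifiLeadLoop (x : Int) (l : List Char) (c : Int) : Bool :=
  match l with
  | [] => true
  | i :: t => if i = '0' then wifiLeadLoop x t (c + 1) else !(decide (c > x))

-- A's third loop: count zeros, on each non-'0' return False if c > 2*x else reset c to 0.
def wifiGapLoop (x : Int) (l : List Char) (c : Int) : Bool :=
  match l with
  | [] => true
  | i :: t => if i = '0' then wifiGapLoop x t (c + 1)
              else if c > 2 * x then false else wifiGapLoop x t 0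

def wifiRange (n : Int) (s : String) (x : Int) : Bool :=
  let l := s.toList
  if wifiLeadLoop x l 0 = false then false
  else
    -- s[::-1] : PySem.List.slice? with step -1 always returns some; getD [] is never the default
    let rev := (PySem.List.slice? l none none (-1)).getD []
    if wifiLeadLoop x rev 0 = false then false
    else wifiGapLoop x l 0

-- ===== PORT B =====
-- idx = [i for i, ch in enumerate(s) if ch != '0']
def wifiIdx (l : List Char) : List Int :=
  ((PySem.List.enumerate l 0).filter (fun p => p.2 ≠ '0')).map (fun p => p.1)

-- for a, b in zip(idx, idx[1:]): if b - a - 1 > 2*x: return False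
def wifiPairLoop (x : Int) (ps : List (Int × Int)) : Bool :=
  match ps with
  | [] => true
  | (a, b) :: t => if b - a - 1 > 2 * x then false else wifiPairLoop x t

def wifiRange_alt (n : Int) (s : String) (x : Int) : Bool :=
  let idx := wifiIdx s.toList
  match idx with
  | [] => true
  | hd :: tl =>
    if hd > x then false
    else if (s.toList.length : Int) - 1 - (hd :: tl).getLast (List.cons_ne_nil hd tl) > x then false
    else wifiPairLoop x (idx.zip (PySem.List.slice idx (some 1) none))

-- ===== PRECONDITION & SPEC =====
def Spec_wifiRange (n : Int) (s : String) (x : Int) (out : Bool) : Prop := out = wifiRange_alt n s x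
instance (n : Int) (s : String) (x : Int) (out : Bool) : Decidable (Spec_wifiRange n s x out) := by unfold Spec_wifiRange; infer_instance

-- ===== CLAIM (what is proved, stated in full; the proofs are below) =====
def Claim_equal_wifiRange : Prop := ∀ (n : Int) (s : String) (x : Int), Dom_wifiRange n s x → Spec_wifiRange n s x (wifiRange n s x)

-- ===== LEMMAS AND PROOFS =====

-- positions of the non-'0' characters of l, counted from p
def posIdx (l : List Char) (p : Int) : List Int :=
  match l with
  | [] => []
  | a :: t => if a = '0' then posIdx t (p + 1) else p :: posIdx t (p + 1)

-- wifiGapLoop rephrased: check gap to the previous router position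
def chkAux (x : Int) (prev : Int) (lst : List Int) : Bool :=
  match lst with
  | [] => true
  | b :: t => if b - prev - 1 > 2 * x then false else chkAux x b t

theorem wifiIdx_eq (l : List Char) (p : Int) :
    ((PySem.List.enumerate l p).filter (fun q => q.2 ≠ '0')).map (fun q => q.1) = posIdx l p := by
  induction l generalizing p with
  | nil => simp [PySem.List.enumerate_nil, posIdx]
  | cons a t ih =>
    rw [PySem.List.enumerate_cons]
    simp only [List.filter_cons, posIdx, ne_eq, decide_not]
    have := ih (p + 1)
    simp only [ne_eq, decide_not] at this
    by_cases h : a = '0' <;> simp [h, this]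

theorem posIdx_append (l1 l2 : List Char) (p : Int) :
    posIdx (l1 ++ l2) p = posIdx l1 p ++ posIdx l2 (p + l1.length) := by
  induction l1 generalizing p with
  | nil => simp [posIdx]
  | cons a t ih =>
    simp only [List.cons_append, posIdx, ih, List.length_cons]
    split <;> simp <;> ring_nf

theorem posIdx_reverse (l : List Char) (p q : Int) :
    posIdx l.reverse p = ((posIdx l q).map (fun i => p + q + (l.length : Int) - 1 - i)).reverse := by
  induction l generalizing q with
  | nil => simp [posIdx]
  | cons a t ih =>
    have hf : (fun i => p + q + ((a :: t).length : Int) - 1 - i)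
        = (fun i => p + (q + 1) + (t.length : Int) - 1 - i) := by
      funext i; simp only [List.length_cons]; push_cast; ring
    by_cases h : a = '0'
    · subst h
      rw [show posIdx ('0' :: t) q = posIdx t (q + 1) from by simp [posIdx]]
      rw [List.reverse_cons, posIdx_append, show posIdx ['0'] (p + (t.reverse.length : Int)) = []
        from by simp [posIdx], List.append_nil, hf]
      exact ih (q + 1)
    · rw [show posIdx (a :: t) q = q :: posIdx t (q + 1) from by simp [posIdx, h]]
      rw [List.reverse_cons, posIdx_append,
        show posIdx [a] (p + (t.reverse.length : Int)) = [p + (t.reverse.length : Int)]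
          from by simp [posIdx, h]]
      simp only [List.map_cons, List.reverse_cons, hf]
      rw [ih (q + 1)]
      congr 1
      simp only [List.length_reverse]
      ring

theorem posIdx_le (l : List Char) (p : Int) : ∀ i ∈ posIdx l p, p ≤ i := by
  induction l generalizing p with
  | nil => simp [posIdx]
  | cons a t ih =>
    intro i hi
    simp only [posIdx] at hi
    split at hi
    · have := ih (p + 1) i hi; omega
    · simp only [List.mem_cons] at hi
      rcases hi with h | h
      · omega
      · have := ih (p + 1) i h; omega

theorem lead_eq (x : Int) (l : List Char) (c p : Int) :
    wifiLeadLoop x l c = match (posIdx l p).head? with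
      | none => true
      | some h => !(decide (c + (h - p) > x)) := by
  induction l generalizing c p with
  | nil => simp [wifiLeadLoop, posIdx]
  | cons a t ih =>
    by_cases h : a = '0'
    · rw [show wifiLeadLoop x (a :: t) c = wifiLeadLoop x t (c + 1) from by
        simp [wifiLeadLoop, h]]
      rw [show posIdx (a :: t) p = posIdx t (p + 1) from by simp [posIdx, h]]
      rw [ih (c + 1) (p + 1)]
      cases (posIdx t (p + 1)).head? with
      | none => rfl
      | some hd =>
        simp only [show (c + 1 + (hd - (p + 1)) > x) ↔ (c + (hd - p) > x) from by omega]
    · rw [show wifiLeadLoop x (a :: t) c = !(decide (c > x)) from by simp [wifiLeadLoop, h]]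
      rw [show posIdx (a :: t) p = p :: posIdx t (p + 1) from by simp [posIdx, h]]
      simp only [List.head?_cons,
        show (c + (p - p) > x) ↔ (c > x) from by omega]

theorem gap_eq (x : Int) (l : List Char) (c p : Int) :
    wifiGapLoop x l c = chkAux x (p - c - 1) (posIdx l p) := by
  induction l generalizing c p with
  | nil => simp [wifiGapLoop, posIdx, chkAux]
  | cons a t ih =>
    by_cases h : a = '0'
    · rw [show wifiGapLoop x (a :: t) c = wifiGapLoop x t (c + 1) from by
        simp [wifiGapLoop, h]]
      rw [show posIdx (a :: t) p = posIdx t (p + 1) from by simp [posIdx, h]]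
      rw [ih (c + 1) (p + 1)]
      congr 1; ring
    · rw [show wifiGapLoop x (a :: t) c
          = if c > 2 * x then false else wifiGapLoop x t 0 from by simp [wifiGapLoop, h]]
      rw [show posIdx (a :: t) p = p :: posIdx t (p + 1) from by simp [posIdx, h]]
      simp only [chkAux, show p - (p - c - 1) - 1 = c from by ring]
      split
      · rfl
      · rw [ih 0 (p + 1)]
        congr 1; ring

theorem pair_eq (x : Int) (prev : Int) (lst : List Int) :
    wifiPairLoop x ((prev :: lst).zip lst) = chkAux x prev lst := by
  induction lst generalizing prev with
  | nil => simp [wifiPairLoop, chkAux]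
  | cons b t ih =>
    simp only [List.zip_cons_cons, wifiPairLoop, chkAux]
    split
    · rfl
    · exact ih b

-- ===== VERDICT (by name: the statement is the Claim_ definition above) =====
theorem wifiRange_spec : Claim_equal_wifiRange := by
  intro n s x _
  unfold Spec_wifiRange wifiRange wifiRange_alt wifiIdx
  simp only [wifiIdx_eq, PySem.List.slice?_none_none_neg_one, Option.getD_some]
  rw [lead_eq x s.toList 0 0, lead_eq x s.toList.reverse 0 0,
      gap_eq x s.toList 0 0,
      posIdx_reverse s.toList 0 0]
  cases hidx : posIdx s.toList 0 with
  | nil => simp [chkAux]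
  | cons hd tl =>
    have hhd : 0 ≤ hd := posIdx_le s.toList 0 hd (by rw [hidx]; exact List.mem_cons_self ..)
    have hlast :
        ((hd :: tl).map (fun i => 0 + 0 + (s.toList.length : Int) - 1 - i)).reverse.head? =
          some (0 + 0 + (s.toList.length : Int) - 1 - (hd :: tl).getLast (List.cons_ne_nil hd tl)) := by
      rw [List.head?_reverse, List.getLast?_map,
          List.getLast?_eq_some_getLast (List.cons_ne_nil hd tl)]
      rfl
    rw [hlast]
    simp only [List.head?_cons]
    by_cases h1 : hd > x
    · simp [h1]
    · have e1 : (!decide (0 + (hd - 0) > x)) = true := by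
        simp only [Bool.not_eq_true', decide_eq_false_iff_not]; omega
      simp only [e1]
      rw [if_neg (by simp : ¬ (true = false)), if_neg h1]
      by_cases h2 : (s.toList.length : Int) - 1 - (hd :: tl).getLast (List.cons_ne_nil hd tl) > x
      · have e2 : (!decide (0 + (0 + 0 + (s.toList.length : Int) - 1
            - (hd :: tl).getLast (List.cons_ne_nil hd tl) - 0) > x)) = false := by
          simp only [Bool.not_eq_false', decide_eq_true_eq]; omega
        rw [if_pos e2, if_pos h2]
      · have e2 : (!decide (0 + (0 + 0 + (s.toList.length : Int) - 1
            - (hd :: tl).getLast (List.cons_ne_nil hd tl) - 0) > x)) = true := by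
          simp only [Bool.not_eq_true', decide_eq_false_iff_not]; omega
        have e2' : ¬ ((!decide (0 + (0 + 0 + (s.toList.length : Int) - 1
            - (hd :: tl).getLast (List.cons_ne_nil hd tl) - 0) > x)) = false) := by
          rw [e2]; simp
        rw [if_neg e2', if_neg h2, PySem.List.slice_from_one, List.tail_cons, pair_eq]
        simp only [chkAux]
        rw [if_neg (show ¬ (hd - (0 - 0 - 1) - 1 > 2 * x) from by omega)]
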